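-- pv_equiv track=rewrite | github.com/wyk18703232953/myResearch | codeComplex/data copy/filteredData/python/cubic/python_cubic_0267.py | generate_arrays
-- ===== SOURCE A (Python) =====
-- def generate_arrays(n):
--     if n <= 0:
--         return [0], [0], [0]
--     base1 = [3 * i + 1 for i in range(n)]
--     base2 = [3 * i + 2 for i in range(n)]
--     base3 = [3 * i + 3 for i in range(n)]
--     a1 = [0] + sorted(base1, reverse=True)
--     a2 = [0] + sorted(base2, reverse=True)
--     a3 = [0] + sorted(base3, reverse=True)
--     return a1, a2, a3
-- ===== SOURCE B (Python) =====
-- def generate_arrays(n):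
--     if n <= 0:
--         return [0], [0], [0]
--     def desc(k):
--         return [0] + [3 * (n - 1 - i) + k for i in range(n)]
--     return desc(1), desc(2), desc(3)
-- ===== Notes on version B (the rewrite author's own statement) =====
-- stated objective: simpler
-- what changed: B generates each list directly in descending order with the closed form 3*(n-1-i)+k instead of building an ascending list and calling sorted(..., reverse=True).
import Mathlib
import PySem

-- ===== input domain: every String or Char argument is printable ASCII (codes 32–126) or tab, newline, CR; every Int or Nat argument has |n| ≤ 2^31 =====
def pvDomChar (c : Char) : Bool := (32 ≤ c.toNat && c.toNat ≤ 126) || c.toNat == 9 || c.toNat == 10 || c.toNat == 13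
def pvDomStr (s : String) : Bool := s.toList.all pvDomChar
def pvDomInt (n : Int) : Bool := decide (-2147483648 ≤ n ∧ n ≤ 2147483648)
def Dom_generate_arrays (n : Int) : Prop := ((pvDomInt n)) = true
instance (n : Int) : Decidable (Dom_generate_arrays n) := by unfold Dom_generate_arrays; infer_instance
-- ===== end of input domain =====

-- B replaces the build-ascending-then-sort-descending passes of A by emitting each
-- list directly in descending order with the closed form 3*(n-1-i)+k (objective: simpler).

-- ===== PORT A =====
def generate_arrays (n : Int) : List Int × List Int × List Int :=
  if n ≤ 0 then ([0], [0], [0])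
  else
    let base1 := (PySem.List.pyRange 0 n 1).map (fun i => 3 * i + 1)
    let base2 := (PySem.List.pyRange 0 n 1).map (fun i => 3 * i + 2)
    let base3 := (PySem.List.pyRange 0 n 1).map (fun i => 3 * i + 3)
    let a1 := [0] ++ PySem.List.sorted base1 (fun x => x) true
    let a2 := [0] ++ PySem.List.sorted base2 (fun x => x) true
    let a3 := [0] ++ PySem.List.sorted base3 (fun x => x) true
    (a1, a2, a3)

-- ===== PORT B =====
def generate_arrays_alt (n : Int) : List Int × List Int × List Int :=
  if n ≤ 0 then ([0], [0], [0])
  else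
    let desc := fun (k : Int) =>
      [0] ++ (PySem.List.pyRange 0 n 1).map (fun i => 3 * (n - 1 - i) + k)
    (desc 1, desc 2, desc 3)

-- ===== PRECONDITION & SPEC =====
def Spec_generate_arrays (n : Int) (out : List Int × List Int × List Int) : Prop := out = generate_arrays_alt n
instance (n : Int) (out : List Int × List Int × List Int) : Decidable (Spec_generate_arrays n out) := by unfold Spec_generate_arrays; infer_instance

-- ===== CLAIM (what is proved, stated in full; the proofs are below) =====
def Claim_equal_generate_arrays : Prop := ∀ (n : Int), Dom_generate_arrays n → Spec_generate_arrays n (generate_arrays n)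

-- ===== LEMMAS AND PROOFS =====

-- The descending closed-form list is the reverse of the ascending one.
theorem desc_eq_reverse (m : Nat) (k : Int) :
    (List.range m).map (fun (j : Nat) => 3 * ((m : Int) - 1 - (j : Int)) + k)
      = ((List.range m).map (fun (j : Nat) => 3 * (j : Int) + k)).reverse := by
  apply List.ext_getElem
  · simp
  · intro i h1 h2
    simp only [List.length_map, List.length_range, List.length_reverse] at h1 h2
    simp only [List.getElem_map, List.getElem_range, List.getElem_reverse, List.length_map,
      List.length_range]
    have : ((m - 1 - i : Nat) : Int) = (m : Int) - 1 - i := by omega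
    rw [this]

-- Sorting the ascending list in reverse yields the descending closed-form list.
theorem sorted_rev_asc (m : Nat) (k : Int) :
    PySem.List.sorted ((List.range m).map (fun (j : Nat) => 3 * (j : Int) + k)) (fun x => x) true
      = (List.range m).map (fun (j : Nat) => 3 * ((m : Int) - 1 - (j : Int)) + k) := by
  apply PySem.List.sorted_rev_eq_of_perm_of_pairwise_gt
  · rw [desc_eq_reverse]; exact List.reverse_perm _
  · rw [desc_eq_reverse, List.pairwise_reverse]
    refine List.Pairwise.map _ ?_ (List.pairwise_lt_range (n := m))
    intro a b hab
    have : (a : Int) < b := by exact_mod_cast hab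
    omega

theorem sorted_rev_pyRange (n : Int) (k : Int) :
    PySem.List.sorted ((PySem.List.pyRange 0 n 1).map (fun i => 3 * i + k)) (fun x => x) true
      = (PySem.List.pyRange 0 n 1).map (fun i => 3 * (n - 1 - i) + k) := by
  rw [PySem.List.pyRange_one, List.map_map, List.map_map]
  have h0 : ((fun i => 3 * i + k) ∘ fun (j : Nat) => (0 : Int) + j)
      = (fun (j : Nat) => 3 * (j : Int) + k) := by
    funext j; simp
  rw [h0, sorted_rev_asc]
  apply List.map_congr_left
  intro j hj
  simp only [List.mem_range] at hj
  simp only [Function.comp_apply]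
  have hn : 0 < n := by omega
  have h1 : (((n - 0).toNat : Int)) = n := by omega
  rw [h1]
  ring

-- ===== VERDICT (by name: the statement is the Claim_ definition above) =====
theorem generate_arrays_spec : Claim_equal_generate_arrays := by
  intro n _
  unfold Spec_generate_arrays generate_arrays generate_arrays_alt
  by_cases h : n ≤ 0
  · simp [h]
  · simp only [h, if_false]
    simp [sorted_rev_pyRange]
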